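-- pv_equiv track=rewrite | github.com/choinara0/Algorithm | Programmer/Level 2/모음 사전/모음 사전.py | solution
-- ===== SOURCE A (Python) =====
-- def solution(word):
--     answer = 0
--     vowelDict = {'A': 0, 'E': 1, 'I': 2, 'O': 3, 'U': 4}
--
--     for i, j in enumerate(word):
--         temp = 0
--         answer += 1
--         if j != 'A':
--             for k in range(5 - i):
--                 temp += 5 ** k
--             answer += temp * vowelDict[j]
--     return answer
-- ===== SOURCE B (Python) =====
-- _W = [781, 156, 31, 6, 1]  # W[i] = sum of 5**k for k in range(5 - i)
--
-- def solution(word):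
--     vowelDict = {'A': 0, 'E': 1, 'I': 2, 'O': 3, 'U': 4}
--     return sum(1 + (_W[i] if i < 5 else 0) * vowelDict[c]
--                for i, c in enumerate(word))
-- ===== Notes on version B (the rewrite author's own statement) =====
-- stated objective: simpler
-- what changed: Replaces the per-character inner geometric-series loop (sum of 5**k for k in range(5-i)) with a precomputed constant weight table W=[781,156,31,6,1] and a single comprehension summing 1 + W[i]*vowelDict[c] per character, dropping the special branch for the first vowel since its digit 0 makes the weighted term vanish.
import Mathlib
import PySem

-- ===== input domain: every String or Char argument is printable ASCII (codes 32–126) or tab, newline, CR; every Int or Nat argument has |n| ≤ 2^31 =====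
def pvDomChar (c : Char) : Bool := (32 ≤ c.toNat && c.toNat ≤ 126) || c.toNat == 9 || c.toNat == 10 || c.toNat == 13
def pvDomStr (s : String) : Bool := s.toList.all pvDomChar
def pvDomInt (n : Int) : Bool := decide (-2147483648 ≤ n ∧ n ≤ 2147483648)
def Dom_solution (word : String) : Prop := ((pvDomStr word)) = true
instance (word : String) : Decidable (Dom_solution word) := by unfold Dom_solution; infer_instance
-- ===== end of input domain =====

-- B replaces A's inner geometric-series loop with a precomputed weight table and a single summed pass (simpler).


-- ===== PORT A =====
def pvVowelDict : PySem.Dict Char Int :=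
  (((((PySem.Dict.empty).insert 'A' 0).insert 'E' 1).insert 'I' 2).insert 'O' 3).insert 'U' 4

-- lookup is total (getD 0) only because Pre_solution restricts chars to the dict's keys (Python raises KeyError otherwise)
def solution (word : String) : Int :=
  (PySem.List.enumerate word.toList).foldl
    (fun answer ij =>
      let answer := answer + 1
      if ij.2 ≠ 'A' then
        let temp := (PySem.List.pyRange 0 (5 - ij.1) 1).foldl (fun t k => t + 5 ^ k.toNat) 0
        answer + temp * (pvVowelDict.getD ij.2 0)
      else answer) 0

-- ===== PORT B =====
def pvW : List Int := [781, 156, 31, 6, 1]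

def solution_alt (word : String) : Int :=
  ((PySem.List.enumerate word.toList).map
    (fun ic => 1 + (if ic.1 < 5 then PySem.List.pyGetD pvW ic.1 0 else 0) * (pvVowelDict.getD ic.2 0))).sum

-- ===== PRECONDITION & SPEC =====
-- Pre_ excludes words containing a non-vowel character: there BOTH Pythons raise KeyError on the dict lookup.
def Pre_solution (word : String) : Prop := (word.toList.all (fun c => decide (c ∈ ['A', 'E', 'I', 'O', 'U']))) = true
instance (word : String) : Decidable (Pre_solution word) := by unfold Pre_solution; infer_instance

def pvWitness_solution : String := "EIO"

def Spec_solution (word : String) (out : Int) : Prop := out = solution_alt word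
instance (word : String) (out : Int) : Decidable (Spec_solution word out) := by unfold Spec_solution; infer_instance

-- ===== CLAIM (what is proved, stated in full; the proofs are below) =====
def Claim_equal_solution : Prop := ∀ (word : String), Dom_solution word → Pre_solution word → Spec_solution word (solution word)

-- ===== LEMMAS AND PROOFS =====

-- A's inner loop equals B's table weight, for any nonnegative index.
lemma temp_eq_weight (i : Int) (hi : 0 ≤ i) :
    (PySem.List.pyRange 0 (5 - i) 1).foldl (fun t k => t + 5 ^ k.toNat) 0
      = (if i < 5 then PySem.List.pyGetD pvW i 0 else 0) := by
  by_cases h : i < 5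
  · have h4 : i ≤ 4 := by omega
    interval_cases i <;> decide
  · rw [PySem.List.pyRange_one_eq_nil (by omega)]
    simp [h]

lemma fold_eq_sum (cs : List Char) : ∀ (s : Int), 0 ≤ s → ∀ (acc : Int),
    (PySem.List.enumerate cs s).foldl
      (fun answer ij =>
        let answer := answer + 1
        if ij.2 ≠ 'A' then
          answer + ((PySem.List.pyRange 0 (5 - ij.1) 1).foldl (fun t k => t + 5 ^ k.toNat) 0)
                     * (pvVowelDict.getD ij.2 0)
        else answer) acc
      = acc + ((PySem.List.enumerate cs s).map
          (fun ic => 1 + (if ic.1 < 5 then PySem.List.pyGetD pvW ic.1 0 else 0)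
                           * (pvVowelDict.getD ic.2 0))).sum := by
  induction cs with
  | nil => intro s _ acc; simp [PySem.List.enumerate_nil]
  | cons c cs ih =>
    intro s hs acc
    rw [PySem.List.enumerate_cons]
    simp only [List.foldl_cons, List.map_cons, List.sum_cons]
    rw [ih (s + 1) (by omega)]
    by_cases hc : c = 'A'
    · subst hc
      have hA : pvVowelDict.getD 'A' (0 : Int) = 0 := by decide
      simp [hA]
      ring
    · simp only [hc, ne_eq, not_false_eq_true, if_pos]
      rw [temp_eq_weight s hs]
      ring

-- ===== VERDICT (by name: the statement is the Claim_ definition above) =====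
theorem solution_spec : Claim_equal_solution := by
  intro word _ _
  show solution word = solution_alt word
  unfold solution solution_alt
  rw [fold_eq_sum word.toList 0 (by omega) 0]
  ring
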